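-- pv_equiv track=rewrite | github.com/drj11/dtr | dtr.py | qa_month
-- ===== SOURCE A (Python) =====
-- import itertools
--
-- def qa_month(month):
--     """Given a Month's worth of daily DTR data, retturn true if
--     it is satsifactory, return false otherwise.  We use the WMO
--     3/5 rule:  No more than 5 missing days and no more than 3 missing
--     consecutively.
--     """
--
--     missing = 0
--     for isgap,block in itertools.groupby(month, lambda x:x is None):
--         if isgap:
--             b = list(block)
--             if len(b) > 3:
--                 return False
--             missing += len(b)
--     if missing > 5:
--         return False
--     return True
-- ===== SOURCE B (Python) =====
-- def qa_month(month):
--     """WMO 3/5 rule via an index table: collect the positions of the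
--     missing days, reject if more than 5, then reject any run of more
--     than 3 consecutive positions."""
--     positions = [i for i, x in enumerate(month) if x is None]
--     if len(positions) > 5:
--         return False
--     prev = -2
--     run = 0
--     for p in positions:
--         if p == prev + 1:
--             run += 1
--         else:
--             run = 1
--         if run > 3:
--             return False
--         prev = p
--     return True
-- ===== Notes on version B (the rewrite author's own statement) =====
-- stated objective: alternative
-- what changed: Replaces the groupby-over-runs pass with an index table: B first collects the positions of missing days, rejects if there are more than 5, then scans that position list for a run of more than 3 consecutive indices.
import Mathlib
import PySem

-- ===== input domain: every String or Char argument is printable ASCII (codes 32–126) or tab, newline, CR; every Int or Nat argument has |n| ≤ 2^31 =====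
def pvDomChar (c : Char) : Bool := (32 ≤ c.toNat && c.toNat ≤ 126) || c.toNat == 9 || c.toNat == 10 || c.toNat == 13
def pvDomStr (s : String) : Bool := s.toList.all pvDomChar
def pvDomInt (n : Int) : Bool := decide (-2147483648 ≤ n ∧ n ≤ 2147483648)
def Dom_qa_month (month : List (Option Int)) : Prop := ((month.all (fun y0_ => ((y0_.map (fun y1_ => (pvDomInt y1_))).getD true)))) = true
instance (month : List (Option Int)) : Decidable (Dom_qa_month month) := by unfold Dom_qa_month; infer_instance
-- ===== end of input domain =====

-- B replaces A's groupby-over-runs pass by an index table of missing positions plus a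
-- consecutive-run scan over that table (alternative decomposition, same cost).

-- ===== PORT A =====
-- the groupby loop: a gap block is the maximal None-run at the head (takeWhile/dropWhile),
-- non-gap elements are skipped; 'missing' accumulates gap lengths
def qaGoA (missing : Int) (l : List (Option Int)) : Bool :=
  match l with
  | [] => if missing > 5 then false else true
  | x :: xs =>
    if x.isNone then
      let b := (x :: xs).takeWhile (·.isNone)
      if (b.length : Int) > 3 then false
      else qaGoA (missing + b.length) ((x :: xs).dropWhile (·.isNone))
    else qaGoA missing xs
termination_by l.length
decreasing_by
  · simp only [List.dropWhile_cons, *]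
    exact Nat.lt_succ_of_le (List.length_dropWhile_le _ xs)
  · simp

def qa_month (month : List (Option Int)) : Bool := qaGoA 0 month

-- ===== PORT B =====
-- positions = [i for i, x in enumerate(month) if x is None]
def pickB (ix : Int × Option Int) : Option Int := if ix.2.isNone then some ix.1 else none

def positionsB (month : List (Option Int)) : List Int :=
  (PySem.List.enumerate month).filterMap pickB

-- the for-loop over positions tracking (prev, run)
def scanB (prev run : Int) : List Int → Bool
  | [] => true
  | p :: ps =>
    let r := if p == prev + 1 then run + 1 else 1
    if r > 3 then false else scanB p r ps

def qa_month_alt (month : List (Option Int)) : Bool :=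
  let positions := positionsB month
  if (positions.length : Int) > 5 then false
  else scanB (-2) 0 positions

-- ===== PRECONDITION & SPEC =====
def Spec_qa_month (month : List (Option Int)) (out : Bool) : Prop := out = qa_month_alt month
instance (month : List (Option Int)) (out : Bool) : Decidable (Spec_qa_month month out) := by unfold Spec_qa_month; infer_instance

-- ===== CLAIM (what is proved, stated in full; the proofs are below) =====
def Claim_equal_qa_month : Prop := ∀ (month : List (Option Int)), Dom_qa_month month → Spec_qa_month month (qa_month month)

-- ===== LEMMAS AND PROOFS =====

-- canonical form: 'no run of more than 3 Nones, continuing a run of length `run`'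
def noLongI (run : Int) : List (Option Int) → Bool
  | [] => true
  | x :: xs => if x.isNone then (if run + 1 > 3 then false else noLongI (run + 1) xs) else noLongI 0 xs

lemma noLongI_cons_some (run : Int) (v : Int) (xs : List (Option Int)) :
    noLongI run (some v :: xs) = noLongI 0 xs := by simp [noLongI]

lemma noLongI_head_not_none (run : Int) (l : List (Option Int))
    (h : ∀ y ys, l = y :: ys → y.isNone = false) : noLongI run l = noLongI 0 l := by
  cases l with
  | nil => rfl
  | cons y ys => simp [noLongI, h y ys rfl]

lemma noLongI_replicate (k : Nat) (rest : List (Option Int)) (r : Int)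
    (hr0 : 0 ≤ r) (hr3 : r ≤ 3)
    (hrest : ∀ y ys, rest = y :: ys → y.isNone = false) :
    noLongI r (List.replicate k (none : Option Int) ++ rest)
      = (decide (r + (k : Int) ≤ 3) && noLongI 0 rest) := by
  induction k generalizing r with
  | zero =>
    simp only [List.replicate, List.nil_append, Nat.cast_zero, add_zero]
    rw [noLongI_head_not_none r rest hrest]
    simp [decide_eq_true_eq, hr3]
  | succ k ih =>
    simp only [List.replicate_succ, List.cons_append, noLongI, Option.isNone_none, if_true]
    by_cases h : r + 1 > 3
    · have : ¬ (r + ((k : Int) + 1) ≤ 3) := by omega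
      simp [h, this]
    · push Not at h
      rw [if_neg (by omega)]
      rw [ih (r + 1) (by omega) h]
      congr 1
      have : r + 1 + (k : Int) = r + ((k : Nat) + 1 : Nat) := by push_cast; ring
      simp [decide_eq_decide]
      omega

lemma countP_none_replicate_split (l : List (Option Int)) :
    (l.countP (·.isNone)) =
      (l.takeWhile (·.isNone)).length + (l.dropWhile (·.isNone)).countP (·.isNone) := by
  conv_lhs => rw [← List.takeWhile_append_dropWhile (p := (·.isNone)) (l := l)]
  rw [List.countP_append]
  congr 1
  rw [List.countP_eq_length]
  intro a ha
  exact List.mem_takeWhile_imp ha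

lemma takeWhile_none_eq_replicate (l : List (Option Int)) :
    l.takeWhile (·.isNone) = List.replicate (l.takeWhile (·.isNone)).length (none : Option Int) := by
  apply List.eq_replicate_of_mem
  intro b hb
  have := List.mem_takeWhile_imp hb
  simpa [Option.isNone_iff_eq_none] using this

lemma dropWhile_head_not (l : List (Option Int)) (y : Option Int) (ys : List (Option Int))
    (h : l.dropWhile (·.isNone) = y :: ys) : y.isNone = false := by
  have := List.head?_dropWhile_not (p := (·.isNone)) (l := l)
  rw [h] at this
  simpa using this

lemma pickB_none (s : Int) : pickB (s, none) = some s := rfl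
lemma pickB_some (s v : Int) : pickB (s, some v) = none := rfl

lemma qaGoA_eq (missing : Int) (l : List (Option Int)) :
    qaGoA missing l = (decide (missing + (l.countP (·.isNone) : Int) ≤ 5) && noLongI 0 l) := by
  induction missing, l using qaGoA.induct with
  | case1 missing h =>
    simp [qaGoA, noLongI, h]
  | case2 missing h =>
    simp [qaGoA, noLongI, h]
    omega
  | case3 missing x xs hx b h3 =>
    have h3' : (((List.takeWhile (fun y => y.isNone) (x :: xs)).length : Int) > 3) := h3
    have hnl : noLongI 0 (x :: xs)
        = (decide ((0:Int) + ((List.takeWhile (fun y => y.isNone) (x :: xs)).length : Int) ≤ 3)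
            && noLongI 0 (List.dropWhile (fun y => y.isNone) (x :: xs))) := by
      conv_lhs => rw [show (x :: xs) = (x :: xs).takeWhile (fun y => y.isNone) ++ (x :: xs).dropWhile (fun y => y.isNone) from (List.takeWhile_append_dropWhile ..).symm]
      rw [takeWhile_none_eq_replicate (x :: xs),
        noLongI_replicate _ _ 0 le_rfl (by omega) (dropWhile_head_not (x :: xs))]
      simp
    rw [qaGoA]
    simp only [hx, if_true]
    rw [if_pos h3', hnl]
    have hnat : ¬ ((List.takeWhile (fun y => y.isNone) (x :: xs)).length ≤ 3) := by omega
    simp [hnat]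
  | case4 missing x xs hx b h3 ih =>
    have h3' : ¬ (((List.takeWhile (fun y => y.isNone) (x :: xs)).length : Int) > 3) := h3
    have ih' : qaGoA (missing + ((List.takeWhile (fun y => y.isNone) (x :: xs)).length : Int))
        (List.dropWhile (fun y => y.isNone) (x :: xs))
        = (decide (missing + ((List.takeWhile (fun y => y.isNone) (x :: xs)).length : Int)
              + (((List.dropWhile (fun y => y.isNone) (x :: xs)).countP (·.isNone)) : Int) ≤ 5)
            && noLongI 0 (List.dropWhile (fun y => y.isNone) (x :: xs))) := ih
    have hnl : noLongI 0 (x :: xs)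
        = (decide ((0:Int) + ((List.takeWhile (fun y => y.isNone) (x :: xs)).length : Int) ≤ 3)
            && noLongI 0 (List.dropWhile (fun y => y.isNone) (x :: xs))) := by
      conv_lhs => rw [show (x :: xs) = (x :: xs).takeWhile (fun y => y.isNone) ++ (x :: xs).dropWhile (fun y => y.isNone) from (List.takeWhile_append_dropWhile ..).symm]
      rw [takeWhile_none_eq_replicate (x :: xs),
        noLongI_replicate _ _ 0 le_rfl (by omega) (dropWhile_head_not (x :: xs))]
      simp
    rw [qaGoA]
    simp only [hx, if_true]
    rw [if_neg h3', ih', hnl]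
    have hk : ((0:Int) + ((List.takeWhile (fun y => y.isNone) (x :: xs)).length : Int) ≤ 3) := by omega
    rw [decide_eq_true hk, Bool.true_and]
    congr 1
    rw [decide_eq_decide]
    rw [countP_none_replicate_split (x :: xs)]
    push_cast
    omega
  | case5 missing x xs hx ih =>
    rw [qaGoA]
    simp only [hx, if_false]
    rw [ih]
    cases x with
    | none => simp at hx
    | some v =>
      simp [noLongI_cons_some, List.countP_cons]

lemma scanB_positions (xs : List (Option Int)) :
    ∀ (s prev r : Int), prev ≤ s - 1 →
    scanB prev r ((PySem.List.enumerate xs s).filterMap pickB)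
      = noLongI (if prev = s - 1 then r else 0) xs := by
  induction xs with
  | nil => intro s prev r _; simp [PySem.List.enumerate_nil, scanB, noLongI]
  | cons x xs ih =>
    intro s prev r hprev
    rw [PySem.List.enumerate_cons]
    cases x with
    | none =>
      rw [List.filterMap_cons, pickB_none]
      by_cases hp : prev = s - 1
      · have hbeq : (s == prev + 1) = true := by simp [hp]
        by_cases h3 : r + 1 > 3
        · simp [scanB, hbeq, h3, hp, noLongI]
        · rw [scanB]
          simp only [hbeq, if_true, if_neg h3]
          rw [ih (s + 1) s (r + 1) (by omega)]
          simp [hp, noLongI, h3]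
      · have hbeq : (s == prev + 1) = false := by simp; omega
        rw [scanB]
        simp only [hbeq, Bool.false_eq_true, if_false]
        rw [if_neg (by norm_num)]
        rw [ih (s + 1) s 1 (by omega)]
        simp [hp, noLongI]
    | some v =>
      rw [List.filterMap_cons, pickB_some]
      rw [ih (s + 1) prev r (by omega)]
      rw [if_neg (by omega), noLongI_cons_some]

lemma length_positionsB (xs : List (Option Int)) :
    ∀ s : Int, ((PySem.List.enumerate xs s).filterMap pickB).length
      = xs.countP (·.isNone) := by
  induction xs with
  | nil => intro s; simp [PySem.List.enumerate_nil]
  | cons x xs ih =>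
    intro s
    rw [PySem.List.enumerate_cons, List.filterMap_cons]
    cases x with
    | none =>
      rw [pickB_none]
      simp [List.countP_cons, ih (s + 1)]
    | some v =>
      rw [pickB_some]
      simp [List.countP_cons, ih (s + 1)]

lemma qa_month_alt_eq (l : List (Option Int)) :
    qa_month_alt l = (decide ((l.countP (·.isNone) : Int) ≤ 5) && noLongI 0 l) := by
  unfold qa_month_alt positionsB
  simp only [length_positionsB l 0]
  by_cases h : ((l.countP (·.isNone) : Int) > 5)
  · rw [if_pos h]
    have hh : ¬ ((l.countP (·.isNone) : Int) ≤ 5) := by omega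
    simp [hh]
  · rw [if_neg h]
    rw [scanB_positions l 0 (-2) 0 (by omega)]
    rw [if_neg (by omega)]
    push Not at h
    simp [h]

-- ===== VERDICT (by name: the statement is the Claim_ definition above) =====
theorem qa_month_spec : Claim_equal_qa_month := by
  intro month _
  unfold Spec_qa_month qa_month
  rw [qaGoA_eq, qa_month_alt_eq]
  norm_num
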